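-- pv_equiv track=rewrite | github.com/1200park/Algorithm | 프로그래머스/0/181830. 정사각형으로 만들기/정사각형으로 만들기.py | solution
-- ===== SOURCE A (Python) =====
-- def solution(arr):
--     if len(arr) == len(arr[0]):
--         return arr
--
--     if len(arr) > len(arr[0]):
--         count = len(arr) - len(arr[0])
--         for idx in arr:
--             idx += [0] * count
--         return arr
--     else:
--         count = len(arr[0]) - len(arr)
--         new_list = [0 for _ in range(len(arr[0]))]
--         for i in range(count):
--             arr.append(new_list)
--         return arr
-- ===== SOURCE B (Python) =====
-- def solution(arr):
--     r, c = len(arr), len(arr[0])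
--     extra = max(0, r - c)
--     return [[arr[i][j] if i < r and j < len(arr[i]) else 0
--              for j in range(len(arr[i]) + extra if i < r else c)]
--             for i in range(max(r, c))]
-- ===== Notes on version B (the rewrite author's own statement) =====
-- stated objective: alternative
-- what changed: B constructs the result cell-by-cell from index pairs in one uniform double comprehension (cell = arr[i][j] if in bounds, else 0, with a computed per-row target width), instead of A's three-way branch on which dimension is larger that mutates rows in place or appends aliased zero-rows; B does not mutate its argument.
import Mathlib
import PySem

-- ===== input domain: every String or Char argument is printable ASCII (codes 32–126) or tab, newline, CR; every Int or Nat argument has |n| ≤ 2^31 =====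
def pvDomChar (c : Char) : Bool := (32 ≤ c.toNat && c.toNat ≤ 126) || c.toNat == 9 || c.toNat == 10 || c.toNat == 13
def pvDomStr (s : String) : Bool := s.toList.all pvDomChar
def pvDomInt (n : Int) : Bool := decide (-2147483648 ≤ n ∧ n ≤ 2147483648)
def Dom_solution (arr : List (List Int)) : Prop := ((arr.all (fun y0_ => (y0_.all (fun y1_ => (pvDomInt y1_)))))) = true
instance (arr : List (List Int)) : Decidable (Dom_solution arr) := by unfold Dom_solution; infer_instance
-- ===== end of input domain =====

-- B builds the square cell-by-cell from index pairs in one uniform double loop instead of A's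
-- three-way branch with pad/append; A mutates and aliases its argument while B builds a fresh
-- list — the equivalence proved here is about the return VALUE only.


-- ===== PORT A =====
def solution (arr : List (List Int)) : List (List Int) :=
  let r := arr.length
  let c := (arr.headD []).length     -- len(arr[0]); Pre_ guarantees arr ≠ []
  if r = c then arr
  else if r > c then
    -- for idx in arr: idx += [0] * count   (in-place row extension → map)
    arr.map (fun idx => idx ++ List.replicate (r - c) 0)
  else
    -- append count copies of new_list
    arr ++ List.replicate (c - r) (List.replicate c 0)

-- ===== PORT B =====
def solution_alt (arr : List (List Int)) : List (List Int) :=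
  let r := arr.length
  let c := (arr.headD []).length
  let extra := r - c                 -- Nat truncated subtraction = max(0, r - c)
  (List.range (max r c)).map (fun i =>
    (List.range (if i < r then (arr.getD i []).length + extra else c)).map (fun j =>
      if i < r ∧ j < (arr.getD i []).length then (arr.getD i []).getD j 0 else 0))

-- ===== PRECONDITION & SPEC =====
-- Pre_ excludes only the empty list, on which A raises IndexError at arr[0] (B raises too).
def Pre_solution (arr : List (List Int)) : Prop := arr ≠ []
instance (arr : List (List Int)) : Decidable (Pre_solution arr) := by unfold Pre_solution; infer_instance
def pvWitness_solution : List (List Int) := [[1, 2], [3, 4], [5, 6]]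

def Spec_solution (arr : List (List Int)) (out : List (List Int)) : Prop := out = solution_alt arr
instance (arr : List (List Int)) (out : List (List Int)) : Decidable (Spec_solution arr out) := by unfold Spec_solution; infer_instance

-- ===== CLAIM (what is proved, stated in full; the proofs are below) =====
def Claim_equal_solution : Prop := ∀ (arr : List (List Int)), Dom_solution arr → Pre_solution arr → Spec_solution arr (solution arr)

-- ===== LEMMAS AND PROOFS =====

-- A row copied verbatim: B's inner map over its own index range reproduces any list.
theorem pv_row_copy (l : List Int) :
    (List.range l.length).map (fun j => if j < l.length then l.getD j 0 else 0) = l := by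
  apply List.ext_getElem
  · simp
  · intro j hj hj'
    simp only [List.getElem_map, List.getElem_range] at *
    rw [if_pos hj', List.getD_eq_getElem _ _ hj']

-- ===== VERDICT (by name: the statement is the Claim_ definition above) =====
theorem solution_spec : Claim_equal_solution := by
  intro arr _ hpre
  obtain ⟨x, t, rfl⟩ : ∃ x t, arr = x :: t := by
    cases arr with
    | nil => exact absurd rfl hpre
    | cons x t => exact ⟨x, t, rfl⟩
  unfold Spec_solution solution solution_alt
  simp only [List.headD_cons]
  split_ifs with h1 h2
  · -- r = c : A returns arr unchanged
    simp only [List.length_cons] at h1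
    have hx : (x :: t).length - x.length = 0 := by simp; omega
    apply List.ext_getElem
    · simp; omega
    · intro i hi hi'
      simp only [List.getElem_map, List.getElem_range]
      have hi2 : i < (x :: t).length := by simpa using hi
      rw [if_pos hi2, hx, Nat.add_zero, List.getD_eq_getElem _ _ hi2]
      simp only [hi2, true_and]
      exact (pv_row_copy _).symm
  · -- r > c : every row extended by (r - c) zeros
    simp only [List.length_cons] at h1 h2
    apply List.ext_getElem
    · simp; omega
    · intro i hi hi'
      have hi2 : i < (x :: t).length := by simp at hi ⊢; omega
      simp only [List.getElem_map, List.getElem_range]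
      rw [if_pos hi2, List.getD_eq_getElem _ _ hi2]
      apply List.ext_getElem
      · simp
      · intro j hj hj'
        simp only [List.getElem_map, List.getElem_range]
        by_cases hjc : j < ((x :: t)[i]).length
        · rw [if_pos ⟨hi2, hjc⟩, List.getD_eq_getElem _ _ hjc,
              List.getElem_append_left hjc]
        · rw [if_neg (by tauto), List.getElem_append_right (by omega)]
          simp
  · -- r < c : (c - r) zero-rows of width c appended, existing rows unchanged
    simp only [List.length_cons] at h1 h2
    apply List.ext_getElem
    · simp; omega
    · intro i hi hi'
      simp only [List.getElem_map, List.getElem_range]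
      by_cases hir : i < (x :: t).length
      · rw [List.getElem_append_left hir, if_pos hir,
            List.getD_eq_getElem _ _ hir]
        have hx : (x :: t).length - x.length = 0 := by simp; omega
        rw [hx, Nat.add_zero]
        simp only [hir, true_and]
        exact (pv_row_copy _).symm
      · rw [List.getElem_append_right (by omega), if_neg hir]
        apply List.ext_getElem
        · simp
        · intro j hj hj'
          simp only [List.getElem_map, List.getElem_range, List.getElem_replicate]
          rw [if_neg (by tauto)]
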